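-- pv_equiv track=rewrite | github.com/treyhakanson/pile | Facebook/fibonacci_subset.py | fibonacci_subset
-- ===== SOURCE A (Python) =====
-- def gen_fib(mx):
--     fib = {1}
--     prev = 1
--     cur = 1
--
--     while cur <= mx:
--         tmp = cur
--         cur += prev
--         prev = tmp
--         fib.add(cur)
--
--     return fib
--
-- def fibonacci_subset(arr):
--     mx = max(arr)
--     fib = gen_fib(mx)
--     subset = []
--     start_i = 0
--     mx_i = 0
--     mx = 0
--
--     for i, x in enumerate(arr):
--         if len(subset) > mx:
--             mx = len(subset)
--             mx_i = start_i
--         if x in fib: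
--             subset.append(x)
--         else:
--             subset.clear()
--             start_i = i + 1
--
--     if len(subset) > mx:
--         mx = len(subset)
--         mx_i = start_i
--
--     return arr[mx_i:mx_i + mx]
-- ===== SOURCE B (Python) =====
-- def gen_fib(mx):
--     fib = {1}
--     prev = 1
--     cur = 1
--
--     while cur <= mx:
--         tmp = cur
--         cur += prev
--         prev = tmp
--         fib.add(cur)
--
--     return fib
--
-- def fibonacci_subset(arr):
--     fib = gen_fib(max(arr))
--     # collapse arr (groupby-style) into maximal segments keyed by Fibonacci membership
--     segs = []
--     for x in arr:
--         k = x in fib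
--         if segs and segs[-1][0] == k:
--             segs[-1][1].append(x)
--         else:
--             segs.append((k, [x]))
--     # pick the first longest Fibonacci segment
--     best = []
--     for k, items in segs:
--         if k and len(items) > len(best):
--             best = items
--     return best
-- ===== Notes on version B (the rewrite author's own statement) =====
-- stated objective: alternative
-- what changed: Replaces A's single streaming pass with index bookkeeping, a mutable current-subset list and a final slice by a two-phase groupby-style decomposition: first collapse the array into maximal segments keyed by Fibonacci membership, then select the first longest Fibonacci segment and return it directly (no indices, no slicing). Pre_ excludes only the empty list, on which both A and B raise ValueError (max([])).
-- outside the precondition, e.g. on fibonacci_subset([]): A raises ValueError, B raises ValueError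
import Mathlib
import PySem

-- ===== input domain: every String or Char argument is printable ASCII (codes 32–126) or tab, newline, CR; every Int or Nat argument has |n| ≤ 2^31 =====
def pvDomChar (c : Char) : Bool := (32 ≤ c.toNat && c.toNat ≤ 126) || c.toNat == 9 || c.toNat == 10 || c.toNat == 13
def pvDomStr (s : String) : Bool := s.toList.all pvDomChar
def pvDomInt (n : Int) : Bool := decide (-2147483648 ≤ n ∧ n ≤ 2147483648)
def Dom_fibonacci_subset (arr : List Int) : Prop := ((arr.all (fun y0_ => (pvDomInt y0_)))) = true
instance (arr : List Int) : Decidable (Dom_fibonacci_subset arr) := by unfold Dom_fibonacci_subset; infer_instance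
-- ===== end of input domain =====

-- B restructures A's streaming pass (index bookkeeping + mutable run + final slice) into a
-- groupby-style two-phase pass: collapse into maximal segments, then pick the first longest
-- Fibonacci segment and return it directly; objective: alternative (same cost).

-- ===== PORT A =====
-- while cur <= mx: tmp=cur; cur+=prev; prev=tmp; fib.add(cur)   (prev, cur stay ≥ 1; proof args only make the loop total)
def gen_fib_loop (mx prev cur : Int) (fib : PySem.Set Int)
    (hp : 1 ≤ prev) (hc : 1 ≤ cur) : PySem.Set Int :=
  if h : cur ≤ mx then
    gen_fib_loop mx cur (cur + prev) (PySem.Set.add fib (cur + prev)) hc (by omega)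
  else fib
termination_by (mx + 1 - cur).toNat
decreasing_by omega

def gen_fib (mx : Int) : PySem.Set Int :=
  gen_fib_loop mx 1 1 (PySem.Set.ofList [1]) (by omega) (by omega)

-- the 'for i, x in enumerate(arr)' loop, carrying the index i
def aLoop (fib : PySem.Set Int) (l : List Int) (i : Int)
    (subset : List Int) (start_i mx_i mxv : Int) : List Int × Int × Int × Int :=
  match l with
  | [] => (subset, start_i, mx_i, mxv)
  | x :: xs =>
    let pr : Int × Int :=
      if (subset.length : Int) > mxv then (start_i, (subset.length : Int)) else (mx_i, mxv)
    if PySem.Set.contains fib x then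
      aLoop fib xs (i + 1) (subset ++ [x]) start_i pr.1 pr.2
    else
      aLoop fib xs (i + 1) [] (i + 1) pr.1 pr.2

def fibonacci_subset (arr : List Int) : List Int :=
  match PySem.List.max? arr (fun y => y) with
  | none => []   -- max([]) raises ValueError: excluded by Pre_
  | some mx =>
    let fib := gen_fib mx
    let r := aLoop fib arr 0 [] 0 0 0
    let fin : Int × Int :=
      if (r.1.length : Int) > r.2.2.2 then (r.2.1, (r.1.length : Int)) else (r.2.2.1, r.2.2.2)
    PySem.List.slice arr (some fin.1) (some (fin.1 + fin.2))

-- ===== PORT B =====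
-- one step of the segment-collapsing loop: extend the last segment or open a new one
def bStep (fib : PySem.Set Int) (segs : List (Bool × List Int)) (x : Int) :
    List (Bool × List Int) :=
  let k := PySem.Set.contains fib x
  match segs.getLast? with
  | some (k', items) =>
    if k' == k then segs.dropLast ++ [(k, items ++ [x])] else segs ++ [(k, [x])]
  | none => segs ++ [(k, [x])]

-- 'if k and len(items) > len(best): best = items'
def bPick (best : List Int) (kg : Bool × List Int) : List Int :=
  if kg.1 && decide (kg.2.length > best.length) then kg.2 else best

def fibonacci_subset_alt (arr : List Int) : List Int :=
  match PySem.List.max? arr (fun y => y) with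
  | none => []   -- max([]) raises ValueError: excluded by Pre_
  | some mx =>
    let fib := gen_fib mx
    let segs := arr.foldl (bStep fib) []
    segs.foldl bPick []

-- ===== PRECONDITION & SPEC =====
-- Pre_ excludes only the empty list, on which A (and B) raise ValueError from max(arr).
def Pre_fibonacci_subset (arr : List Int) : Prop := arr ≠ []
instance (arr : List Int) : Decidable (Pre_fibonacci_subset arr) := by
  unfold Pre_fibonacci_subset; infer_instance

def pvWitness_fibonacci_subset : List Int := [1, 4, 1, 1]

def Spec_fibonacci_subset (arr : List Int) (out : List Int) : Prop := out = fibonacci_subset_alt arr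
instance (arr : List Int) (out : List Int) : Decidable (Spec_fibonacci_subset arr out) := by
  unfold Spec_fibonacci_subset; infer_instance

-- ===== CLAIM (what is proved, stated in full; the proofs are below) =====
def Claim_equal_fibonacci_subset : Prop := ∀ (arr : List Int), Dom_fibonacci_subset arr → Pre_fibonacci_subset arr → Spec_fibonacci_subset arr (fibonacci_subset arr)

-- ===== LEMMAS AND PROOFS =====

-- maximal key-runs of l under p (what B's first pass produces)
def runs (p : Int → Bool) : List Int → List (Bool × List Int)
  | [] => []
  | x :: xs =>
    (p x, x :: xs.takeWhile (fun y => p y == p x)) ::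
      runs p (xs.dropWhile (fun y => p y == p x))
termination_by l => l.length
decreasing_by
  simp only [List.length_cons]
  exact Nat.lt_succ_of_le (List.length_dropWhile_le _ _)

-- glue a trailing open segment onto a run decomposition
def glue (k : Bool) (g : List Int) : List (Bool × List Int) → List (Bool × List Int)
  | [] => [(k, g)]
  | (k', t) :: rs => if k' == k then (k, g ++ t) :: rs else (k, g) :: (k', t) :: rs

-- single-peel decomposition used to read off A's loop
def runsA (p : Int → Bool) : List Int → List (Bool × List Int)
  | [] => []
  | x :: xs =>
    if p x then (true, x :: xs.takeWhile p) :: runsA p (xs.dropWhile p)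
    else (false, [x]) :: runsA p xs
termination_by l => l.length
decreasing_by
  · simp only [List.length_cons]
    exact Nat.lt_succ_of_le (List.length_dropWhile_le _ _)
  · simp

-- maximal p-runs with their start positions
def truns (p : Int → Bool) : List Int → Int → List (Int × List Int)
  | [], _ => []
  | x :: xs, pos =>
    if p x then
      (pos, x :: xs.takeWhile p) :: truns p (xs.dropWhile p) (pos + 1 + (xs.takeWhile p).length)
    else truns p xs (pos + 1)
termination_by l => l.length
decreasing_by
  · simp only [List.length_cons]
    exact Nat.lt_succ_of_le (List.length_dropWhile_le _ _)
  · simp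

-- first-longest fold over positioned runs, (best_start, best_len) form
def tfold : Int × Int → List (Int × List Int) → Int × Int
  | s, [] => s
  | (mi, mv), (s, g) :: ts => tfold (if (g.length : Int) > mv then (s, (g.length : Int)) else (mi, mv)) ts

-- first-longest fold over positioned runs, items form
def tfoldI : List Int → List (Int × List Int) → List Int
  | best, [] => best
  | best, (_, g) :: ts => tfoldI (if g.length > best.length then g else best) ts

-- positioned best-fold over a (key, items) decomposition (reads off A's bump discipline)
def fbpStep : (Int × Int) × Int → Bool × List Int → (Int × Int) × Int :=
  fun s kg =>
    ((if kg.1 && decide ((kg.2.length : Int) > s.1.2) then (s.2, (kg.2.length : Int)) else s.1),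
      s.2 + (kg.2.length : Int))

def fbp (mi mv pos : Int) (segs : List (Bool × List Int)) : Int × Int :=
  (segs.foldl fbpStep ((mi, mv), pos)).1

-- A's loop followed by the final bump
def afterA (fib : PySem.Set Int) (l : List Int) (i : Int)
    (subset : List Int) (start_i mx_i mxv : Int) : Int × Int :=
  let r := aLoop fib l i subset start_i mx_i mxv
  if (r.1.length : Int) > r.2.2.2 then (r.2.1, (r.1.length : Int)) else (r.2.2.1, r.2.2.2)

theorem runs_cons (p : Int → Bool) (x : Int) (xs : List Int) :
    runs p (x :: xs) = (p x, x :: xs.takeWhile (fun y => p y == p x)) ::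
      runs p (xs.dropWhile (fun y => p y == p x)) := by
  rw [runs]

theorem glue_runs (p : Int → Bool) (l : List Int) (k : Bool) (g : List Int) :
    glue k g (runs p l) =
      (k, g ++ l.takeWhile (fun y => p y == k)) :: runs p (l.dropWhile (fun y => p y == k)) := by
  cases l with
  | nil => simp [runs, glue]
  | cons x xs =>
    rw [runs_cons]
    by_cases h : p x = k
    · subst h
      simp [glue]
    · have hb : (p x == k) = false := by simp [h]
      simp only [glue, hb, Bool.false_eq_true, ite_false, List.takeWhile_cons,
        List.dropWhile_cons]
      rw [runs_cons]
      simp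

theorem runs_pos (p : Int → Bool) (x : Int) (xs : List Int) (h : p x = true) :
    runs p (x :: xs) = (true, x :: xs.takeWhile p) :: runs p (xs.dropWhile p) := by
  rw [runs_cons]
  have : (fun y => p y == p x) = p := by funext y; simp [h]
  rw [this, h]

theorem bfold_append (fib : PySem.Set Int) (l : List Int) :
    ∀ (segs : List (Bool × List Int)) (k : Bool) (g : List Int),
      l.foldl (bStep fib) (segs ++ [(k, g)]) =
        segs ++ glue k g (runs (fun x => PySem.Set.contains fib x) l) := by
  induction l with
  | nil => intro segs k g; simp [runs, glue]
  | cons x xs ih =>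
    intro segs k g
    rw [List.foldl_cons]
    have hstep : bStep fib (segs ++ [(k, g)]) x =
        if k == PySem.Set.contains fib x then segs ++ [(PySem.Set.contains fib x, g ++ [x])]
        else (segs ++ [(k, g)]) ++ [(PySem.Set.contains fib x, [x])] := by
      simp only [bStep, List.getLast?_concat, List.dropLast_concat]
    rw [hstep]
    by_cases h : (k == PySem.Set.contains fib x)
    · have hk : (decide (x ∈ fib) : Bool) = k := by
        have hx := (beq_iff_eq.mp h).symm
        simpa using hx
      rw [if_pos h, ih, glue_runs, glue_runs]
      simp [hk]
    · rw [if_neg h, ih, glue_runs, runs_cons]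
      have hb : (PySem.Set.contains fib x == k) = false := by
        cases hkk : (PySem.Set.contains fib x == k)
        · rfl
        · exact absurd (by simp_all [beq_iff_eq]) h
      simp only [glue, hb, Bool.false_eq_true, ite_false]
      simp

theorem bfold_nil (fib : PySem.Set Int) (l : List Int) :
    l.foldl (bStep fib) [] = runs (fun x => PySem.Set.contains fib x) l := by
  cases l with
  | nil => simp [runs]
  | cons x xs =>
    rw [List.foldl_cons]
    have h0 : bStep fib [] x = [(PySem.Set.contains fib x, [x])] := by simp [bStep]
    rw [h0]
    have := bfold_append fib xs [] (PySem.Set.contains fib x) [x]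
    simp only [List.nil_append] at this
    rw [this, glue_runs, runs_cons]
    simp

theorem runsA_cons (p : Int → Bool) (x : Int) (xs : List Int) :
    runsA p (x :: xs) =
      if p x then (true, x :: xs.takeWhile p) :: runsA p (xs.dropWhile p)
      else (false, [x]) :: runsA p xs := by
  rw [runsA]

theorem truns_cons (p : Int → Bool) (x : Int) (xs : List Int) (pos : Int) :
    truns p (x :: xs) pos =
      if p x then
        (pos, x :: xs.takeWhile p) ::
          truns p (xs.dropWhile p) (pos + 1 + (xs.takeWhile p).length)
      else truns p xs (pos + 1) := by
  rw [truns]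

theorem fbpStep_bump (G : List Int) (c st mi mv : Int) (hc : c ≤ (G.length : Int)) :
    fbpStep ((if c > mv then (st, c) else (mi, mv)), st) (true, G) =
      fbpStep ((mi, mv), st) (true, G) := by
  simp only [fbpStep, Bool.true_and]
  split_ifs with h1 h2 h3 h4 h5 <;> simp_all [Prod.ext_iff] <;> omega

theorem fbp_skip2 (mi mv st i : Int) (subset : List Int) (x : Int)
    (rest : List (Bool × List Int)) (hpos : st + (subset.length : Int) = i) :
    fbp mi mv st ((true, subset) :: (false, [x]) :: rest) =
      fbp (fbpStep ((mi, mv), st) (true, subset)).1.1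
        (fbpStep ((mi, mv), st) (true, subset)).1.2 (i + 1) rest := by
  simp only [fbp, List.foldl_cons]
  have hS : fbpStep (fbpStep ((mi, mv), st) (true, subset)) (false, [x]) =
      ((fbpStep ((mi, mv), st) (true, subset)).1, i + 1) := by
    simp only [fbpStep, Bool.false_and, Bool.true_and]
    simp [Prod.ext_iff]
    omega
  rw [hS]

theorem fbp_front (p : Int → Bool) (l : List Int) (mi mv pos : Int) (h : 0 ≤ mv) :
    fbp mi mv pos ((true, l.takeWhile p) :: runsA p (l.dropWhile p)) =
      fbp mi mv pos (runsA p l) := by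
  cases l with
  | nil =>
    have hmv : ¬ (mv < 0) := by omega
    simp [runsA, fbp, fbpStep, hmv]
  | cons x xs =>
    by_cases hp : p x
    · rw [runsA_cons, if_pos hp]
      simp [hp]
    · simp only [List.takeWhile_cons, List.dropWhile_cons, hp, Bool.false_eq_true, ite_false]
      rw [runsA_cons, if_neg (show ¬ (p x = true) from hp)]
      have hmv : ¬ (mv < 0) := by omega
      simp [fbp, fbpStep, hmv]

theorem aMain (fib : PySem.Set Int) (l : List Int) :
    ∀ (i : Int) (subset : List Int) (st mi mv : Int), 0 ≤ mv →
      st = i - subset.length →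
      afterA fib l i subset st mi mv =
        fbp mi mv st ((true, subset ++ l.takeWhile (fun x => PySem.Set.contains fib x)) ::
          runsA (fun x => PySem.Set.contains fib x)
            (l.dropWhile (fun x => PySem.Set.contains fib x))) := by
  induction l with
  | nil =>
    intro i subset st mi mv h0 hst
    simp [afterA, aLoop, runsA, fbp, fbpStep]
  | cons x xs ih =>
    intro i subset st mi mv h0 hst
    have h0' : 0 ≤ (if (subset.length : Int) > mv then (st, (subset.length : Int)) else (mi, mv)).2 := by
      split
      · simp
      · simpa using h0
    by_cases hp : PySem.Set.contains fib x
    · have hA : afterA fib (x :: xs) i subset st mi mv =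
          afterA fib xs (i + 1) (subset ++ [x]) st
            (if (subset.length : Int) > mv then (st, (subset.length : Int)) else (mi, mv)).1
            (if (subset.length : Int) > mv then (st, (subset.length : Int)) else (mi, mv)).2 := by
        simp only [afterA, aLoop, hp, ite_true]
      rw [hA]
      rw [ih (i + 1) (subset ++ [x]) st _ _ h0'
        (by simp only [List.length_append, List.length_cons, List.length_nil]; push_cast; omega)]
      simp only [List.takeWhile_cons, List.dropWhile_cons, hp, ite_true]
      have hG : subset ++ [x] ++ xs.takeWhile (fun x => PySem.Set.contains fib x) =
          subset ++ x :: xs.takeWhile (fun x => PySem.Set.contains fib x) := by simp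
      rw [hG]
      set G := subset ++ x :: xs.takeWhile (fun x => PySem.Set.contains fib x) with hGdef
      have hlen : (subset.length : Int) ≤ (G.length : Int) := by
        rw [hGdef]; simp only [List.length_append, List.length_cons]; push_cast; omega
      simp only [fbp, List.foldl_cons, Prod.mk.eta]
      rw [fbpStep_bump G (subset.length : Int) st mi mv hlen]
    · have hA : afterA fib (x :: xs) i subset st mi mv =
          afterA fib xs (i + 1) [] (i + 1)
            (if (subset.length : Int) > mv then (st, (subset.length : Int)) else (mi, mv)).1
            (if (subset.length : Int) > mv then (st, (subset.length : Int)) else (mi, mv)).2 := by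
        simp only [afterA, aLoop, hp, Bool.false_eq_true, ite_false]
      rw [hA]
      have hst' : (i + 1 : Int) = (i + 1) - ((([] : List Int)).length : Int) := by simp
      rw [ih (i + 1) [] (i + 1) _ _ h0' hst']
      simp only [List.nil_append]
      rw [fbp_front (fun x => PySem.Set.contains fib x) xs
        (if (subset.length : Int) > mv then (st, (subset.length : Int)) else (mi, mv)).1
        (if (subset.length : Int) > mv then (st, (subset.length : Int)) else (mi, mv)).2
        (i + 1) h0']
      simp only [List.takeWhile_cons, List.dropWhile_cons, hp, Bool.false_eq_true, ite_false,
        List.append_nil]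
      rw [runsA_cons, if_neg (show ¬ (PySem.Set.contains fib x = true) from hp)]
      rw [fbp_skip2 mi mv st i subset x (runsA (fun x => PySem.Set.contains fib x) xs) (by omega)]
      have hpr : (fbpStep ((mi, mv), st) (true, subset)).1 =
          (if (subset.length : Int) > mv then (st, (subset.length : Int)) else (mi, mv)) := by
        simp [fbpStep]
      rw [hpr]

theorem tfold_cons (mi mv s : Int) (g : List Int) (ts : List (Int × List Int)) :
    tfold (mi, mv) ((s, g) :: ts) =
      tfold (if (g.length : Int) > mv then (s, (g.length : Int)) else (mi, mv)) ts := rfl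

theorem tfoldI_cons (best : List Int) (s : Int) (g : List Int) (ts : List (Int × List Int)) :
    tfoldI best ((s, g) :: ts) = tfoldI (if g.length > best.length then g else best) ts := rfl

theorem fbp_truns (p : Int → Bool) (n : Nat) :
    ∀ (l : List Int), l.length ≤ n → ∀ (mi mv pos : Int),
      fbp mi mv pos (runsA p l) = tfold (mi, mv) (truns p l pos) := by
  induction n with
  | zero =>
    intro l hl mi mv pos
    have : l = [] := List.eq_nil_of_length_eq_zero (Nat.le_zero.mp hl)
    subst this
    simp [runsA, truns, fbp, tfold]
  | succ n ih =>
    intro l hl mi mv pos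
    cases l with
    | nil => simp [runsA, truns, fbp, tfold]
    | cons x xs =>
      by_cases hp : p x
      · rw [runsA_cons, if_pos hp, truns_cons, if_pos hp]
        have hd : (xs.dropWhile p).length ≤ n := by
          have h1 := List.length_dropWhile_le p xs
          simp only [List.length_cons] at hl
          omega
        rw [tfold_cons]
        set a := (if (((x :: xs.takeWhile p).length : Int)) > mv
            then (pos, ((x :: xs.takeWhile p).length : Int)) else (mi, mv)) with ha
        have h1 : fbp mi mv pos ((true, x :: xs.takeWhile p) :: runsA p (xs.dropWhile p)) =
            fbp a.1 a.2 (pos + ((x :: xs.takeWhile p).length : Int)) (runsA p (xs.dropWhile p)) := by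
          simp only [fbp, List.foldl_cons, fbpStep, Bool.true_and, decide_eq_true_eq, Prod.mk.eta,
            ha]
        rw [h1, ih (xs.dropWhile p) hd a.1 a.2 (pos + ((x :: xs.takeWhile p).length : Int)),
          Prod.mk.eta]
        have hq : pos + (((x :: xs.takeWhile p).length : Int)) =
            pos + 1 + (((xs.takeWhile p).length : Int)) := by
          push_cast [List.length_cons]; ring
        rw [hq]
      · rw [runsA_cons, if_neg hp, truns_cons, if_neg hp]
        simp only [fbp, List.foldl_cons, fbpStep, Bool.false_and, List.length_cons,
          List.length_nil]
        have hxs : xs.length ≤ n := by simp only [List.length_cons] at hl; omega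
        have := ih xs hxs mi mv (pos + 1)
        simp only [fbp] at this
        simpa using this

theorem truns_skip (p : Int → Bool) :
    ∀ (t : List Int), (∀ y ∈ t, p y = false) → ∀ (rest : List Int) (pos : Int),
      truns p (t ++ rest) pos = truns p rest (pos + t.length) := by
  intro t
  induction t with
  | nil => intro _ rest pos; simp
  | cons y t ih =>
    intro h rest pos
    rw [List.cons_append, truns_cons,
      if_neg (show ¬ p y = true by simp [h y List.mem_cons_self])]
    rw [ih (fun z hz => h z (List.mem_cons_of_mem _ hz)) rest (pos + 1)]
    congr 1
    simp only [List.length_cons]; push_cast; ring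

theorem bpick_truns (p : Int → Bool) (n : Nat) :
    ∀ (l : List Int), l.length ≤ n → ∀ (best : List Int) (pos : Int),
      (runs p l).foldl bPick best = tfoldI best (truns p l pos) := by
  induction n with
  | zero =>
    intro l hl best pos
    have : l = [] := List.eq_nil_of_length_eq_zero (Nat.le_zero.mp hl)
    subst this
    simp [runs, truns, tfoldI]
  | succ n ih =>
    intro l hl best pos
    cases l with
    | nil => simp [runs, truns, tfoldI]
    | cons x xs =>
      by_cases hp : p x
      · rw [runs_pos p x xs hp, truns_cons, if_pos hp, List.foldl_cons, tfoldI_cons]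
        have hb : bPick best (true, x :: xs.takeWhile p) =
            if (x :: xs.takeWhile p).length > best.length then x :: xs.takeWhile p else best := by
          simp [bPick]
        rw [hb]
        have hd : (xs.dropWhile p).length ≤ n := by
          have h1 := List.length_dropWhile_le p xs
          simp only [List.length_cons] at hl
          omega
        exact ih (xs.dropWhile p) hd _ _
      · have hpf : p x = false := Bool.not_eq_true _ ▸ (by simpa using hp)
        rw [runs_cons, truns_cons, if_neg hp, List.foldl_cons]
        have hb : bPick best (p x, x :: xs.takeWhile (fun y => p y == p x)) = best := by
          simp [bPick, hpf]
        rw [hb]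
        -- decompose xs into its leading non-p block and the rest
        have hsplit : xs = xs.takeWhile (fun y => p y == p x) ++ xs.dropWhile (fun y => p y == p x) :=
          (List.takeWhile_append_dropWhile).symm
        have hall : ∀ y ∈ xs.takeWhile (fun y => p y == p x), p y = false := by
          intro y hy
          have := List.mem_takeWhile_imp hy
          simp only [hpf, beq_iff_eq] at this
          exact this
        conv_rhs => rw [hsplit]
        rw [truns_skip p _ hall _ (pos + 1)]
        have hd : (xs.dropWhile (fun y => p y == p x)).length ≤ n := by
          have h1 := List.length_dropWhile_le (fun y => p y == p x) xs
          simp only [List.length_cons] at hl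
          omega
        exact ih (xs.dropWhile (fun y => p y == p x)) hd best _

theorem truns_valid (p : Int → Bool) (n : Nat) :
    ∀ (l : List Int), l.length ≤ n → ∀ (pos s : Int) (g : List Int),
      (s, g) ∈ truns p l pos →
      ∃ pre suf, l = pre ++ g ++ suf ∧ (pre.length : Int) + pos = s := by
  induction n with
  | zero =>
    intro l hl pos s g hm
    have : l = [] := List.eq_nil_of_length_eq_zero (Nat.le_zero.mp hl)
    subst this
    simp [truns] at hm
  | succ n ih =>
    intro l hl pos s g hm
    cases l with
    | nil => simp [truns] at hm
    | cons x xs =>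
      by_cases hp : p x
      · rw [truns_cons, if_pos hp] at hm
        rcases List.mem_cons.mp hm with heq | htail
        · injection heq with hs hg
          refine ⟨[], xs.dropWhile p, ?_, by simpa using hs.symm⟩
          simp [hg, List.takeWhile_append_dropWhile]
        · have hd : (xs.dropWhile p).length ≤ n := by
            have h1 := List.length_dropWhile_le p xs
            simp only [List.length_cons] at hl
            omega
          obtain ⟨pre', suf, hdec, hlen⟩ := ih (xs.dropWhile p) hd _ s g htail
          refine ⟨x :: xs.takeWhile p ++ pre', suf, ?_, ?_⟩
          · have : xs = xs.takeWhile p ++ xs.dropWhile p :=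
              (List.takeWhile_append_dropWhile).symm
            conv_lhs => rw [this]
            rw [hdec]
            simp
          · simp only [List.length_append, List.length_cons] at hlen ⊢
            push_cast at hlen ⊢
            omega
      · rw [truns_cons, if_neg hp] at hm
        have hxs : xs.length ≤ n := by simp only [List.length_cons] at hl; omega
        obtain ⟨pre', suf, hdec, hlen⟩ := ih xs hxs _ s g hm
        refine ⟨x :: pre', suf, by simp [hdec], ?_⟩
        simp only [List.length_cons]
        push_cast at hlen ⊢
        omega

theorem slice_tfold (arr : List Int) :
    ∀ (ts : List (Int × List Int)) (mi mv : Int) (best : List Int),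
      (∀ s g, (s, g) ∈ ts → ∃ pre suf, arr = pre ++ g ++ suf ∧ (pre.length : Int) = s) →
      PySem.List.slice arr (some mi) (some (mi + mv)) = best →
      mv = (best.length : Int) →
      PySem.List.slice arr (some (tfold (mi, mv) ts).1)
        (some ((tfold (mi, mv) ts).1 + (tfold (mi, mv) ts).2)) = tfoldI best ts := by
  intro ts
  induction ts with
  | nil =>
    intro mi mv best _ hsl _
    exact hsl
  | cons hd ts ih =>
    obtain ⟨s, g⟩ := hd
    intro mi mv best hvalid hsl hmv
    rw [tfold_cons, tfoldI_cons]
    by_cases hgt : (g.length : Int) > mv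
    · have hgt' : g.length > best.length := by
        rw [hmv] at hgt
        exact_mod_cast hgt
      rw [if_pos hgt, if_pos hgt']
      obtain ⟨pre, suf, hdec, hs⟩ := hvalid s g List.mem_cons_self
      apply ih
      · intro s' g' hm
        exact hvalid s' g' (List.mem_cons_of_mem _ hm)
      · rw [hdec, ← hs]
        rw [PySem.List.slice_natCast_add]
        rw [List.append_assoc, List.drop_left, List.take_left]
      · rfl
    · have hgt' : ¬ (g.length > best.length) := by
        rw [hmv] at hgt
        intro hc
        exact hgt (by exact_mod_cast hc)
      rw [if_neg hgt, if_neg hgt']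
      exact ih mi mv best (fun s' g' hm => hvalid s' g' (List.mem_cons_of_mem _ hm)) hsl hmv

theorem main_eq (arr : List Int) (h : arr ≠ []) :
    fibonacci_subset arr = fibonacci_subset_alt arr := by
  obtain ⟨mx, hmx⟩ : ∃ mx, PySem.List.max? arr (fun y => y) = some mx := by
    cases hm : PySem.List.max? arr (fun y => y) with
    | none => exact absurd ((PySem.List.max?_eq_none_iff arr (fun y => y)).mp hm) h
    | some m => exact ⟨m, rfl⟩
  unfold fibonacci_subset fibonacci_subset_alt
  rw [hmx]
  show PySem.List.slice arr (some (afterA (gen_fib mx) arr 0 [] 0 0 0).1)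
      (some ((afterA (gen_fib mx) arr 0 [] 0 0 0).1 + (afterA (gen_fib mx) arr 0 [] 0 0 0).2)) =
    (arr.foldl (bStep (gen_fib mx)) []).foldl bPick []
  rw [aMain (gen_fib mx) arr 0 [] 0 0 0 le_rfl (by simp)]
  simp only [List.nil_append]
  rw [fbp_front _ arr 0 0 0 le_rfl]
  rw [fbp_truns (fun x => PySem.Set.contains (gen_fib mx) x) arr.length arr le_rfl 0 0 0]
  rw [bfold_nil]
  rw [bpick_truns (fun x => PySem.Set.contains (gen_fib mx) x) arr.length arr le_rfl [] 0]
  apply slice_tfold arr (truns (fun x => PySem.Set.contains (gen_fib mx) x) arr 0) 0 0 []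
  · intro s g hm
    obtain ⟨pre, suf, hdec, hl⟩ :=
      truns_valid (fun x => PySem.Set.contains (gen_fib mx) x) arr.length arr le_rfl 0 s g hm
    exact ⟨pre, suf, hdec, by omega⟩
  · rw [show ((0 : Int) + 0) = ((0 : Nat) : Int) from by norm_num,
      show (some (0 : Int)) = some ((0 : Nat) : Int) from by norm_num]
    rw [PySem.List.slice_natCast]
    simp
  · simp

-- ===== VERDICT (by name: the statement is the Claim_ definition above) =====
theorem fibonacci_subset_spec : Claim_equal_fibonacci_subset := by
  intro arr _ hpre
  unfold Spec_fibonacci_subset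
  exact main_eq arr hpre
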